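-- pv_equiv track=rewrite | github.com/axp-knickei/CirculAn | genome_features_pipeline.py | find_keyword_matches
-- ===== SOURCE A (Python) =====
-- from typing import Dict, List, Optional, Tuple
--
-- def find_keyword_matches(text_by_prokka: Dict[str, str], keywords: Dict[str, List[str]]) -> Dict[str, set]:
--     """
--     For each category in keywords, return a set of Prokka_IDs matched (deduplicated).
--     """
--     matches = {cat: set() for cat in keywords}
--     for pid, txt in text_by_prokka.items():
--         if not txt:
--             continue
--         for cat, kwlist in keywords.items():
--             for kw in kwlist:
--                 if kw.lower() in txt:
--                     matches[cat].add(pid)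
--                     break
--     return matches
-- ===== SOURCE B (Python) =====
-- def find_keyword_matches(text_by_prokka, keywords):
--     # Hash-set multi-pattern matching: collect the set of lowered-keyword
--     # lengths once; for each non-empty text build (in one pass) the hash set of
--     # all its substrings having one of those lengths; a keyword then matches a
--     # text by a single O(1) set lookup of its lowered form instead of a
--     # substring scan per (text, keyword) pair.
--     lens = {len(kw.lower()) for kwlist in keywords.values() for kw in kwlist}
--     subs_by_pid = [(pid, {txt[i:i + L] for L in lens for i in range(len(txt) - L + 1)})
--                    for pid, txt in text_by_prokka.items() if txt]
--     return {cat: {pid for pid, subs in subs_by_pid if any(kw.lower() in subs for kw in kwlist)}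
--             for cat, kwlist in keywords.items()}
-- ===== Notes on version B (the rewrite author's own statement) =====
-- stated objective: alternative
-- what changed: Replaced A's per-(text, keyword) substring scans by hash-set multi-pattern matching: the set of lowered-keyword lengths is collected once, each non-empty text yields the hash set of all its substrings of those lengths in one pass, and every keyword is then tested by a single set lookup instead of a scan of the text; Pre_ only encodes the key-uniqueness Python dicts guarantee for both association-list arguments.
import Mathlib
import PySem

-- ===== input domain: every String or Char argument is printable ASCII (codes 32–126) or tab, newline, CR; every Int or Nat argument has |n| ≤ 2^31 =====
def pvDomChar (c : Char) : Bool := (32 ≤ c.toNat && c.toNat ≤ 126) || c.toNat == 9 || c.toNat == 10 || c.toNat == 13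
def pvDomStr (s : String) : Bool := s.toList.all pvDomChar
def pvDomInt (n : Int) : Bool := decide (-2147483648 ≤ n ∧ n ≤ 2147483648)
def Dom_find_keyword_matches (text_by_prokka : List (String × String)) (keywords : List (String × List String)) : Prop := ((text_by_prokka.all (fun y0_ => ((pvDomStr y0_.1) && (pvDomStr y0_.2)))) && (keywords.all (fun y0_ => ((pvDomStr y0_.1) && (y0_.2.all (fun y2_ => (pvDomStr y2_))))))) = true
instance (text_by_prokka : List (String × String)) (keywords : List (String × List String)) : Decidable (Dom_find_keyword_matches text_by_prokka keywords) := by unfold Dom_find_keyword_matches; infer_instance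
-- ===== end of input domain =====

-- B replaces A's per-(text, keyword) substring scans by hash-set multi-pattern matching:
-- the set of lowered-keyword lengths is collected once, each non-empty text yields the set
-- of its substrings of those lengths, and a keyword matches by one set lookup.

-- ===== PORT A =====
-- matches[cat].add(pid): update the first entry of the dict whose key is cat
def pvAddMatch : List (String × List String) → String → String → List (String × List String)
  | [], _, _ => []
  | (c, s) :: rest, cat, pid =>
      if c = cat then (c, PySem.Set.add s pid) :: rest else (c, s) :: pvAddMatch rest cat pid

-- for kw in kwlist: if kw.lower() in txt: matches[cat].add(pid); break
def pvKwLoop (m : List (String × List String)) (kwlist : List String)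
    (cat pid txt : String) : List (String × List String) :=
  match kwlist with
  | [] => m
  | kw :: rest =>
      if PySem.Str.isIn (PySem.Str.lower kw) txt then pvAddMatch m cat pid
      else pvKwLoop m rest cat pid txt

def find_keyword_matches (text_by_prokka : List (String × String)) (keywords : List (String × List String)) : List (String × List String) :=
  -- matches = {cat: set() for cat in keywords}
  let init := keywords.map (fun e => (e.1, ([] : List String)))
  text_by_prokka.foldl
    (fun m p =>
      if p.2 = "" then m   -- if not txt: continue
      else keywords.foldl (fun m' e => pvKwLoop m' e.2 e.1 p.1 p.2) m)
    init

-- ===== PORT B =====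
-- {txt[i:i+L] for L in lens for i in range(len(txt) - L + 1)}
def pvSubs (txt : String) (lens : List Int) : PySem.Set String :=
  PySem.Set.ofList (lens.flatMap (fun L =>
    (PySem.List.pyRange 0 ((PySem.Str.len txt : Int) - L + 1) 1).map
      (fun i => PySem.Str.slice txt (some i) (some (i + L)))))

-- lens = {len(kw.lower()) for kwlist in keywords.values() for kw in kwlist}
def pvLens (keywords : List (String × List String)) : PySem.Set Int :=
  PySem.Set.ofList (keywords.flatMap (fun e => e.2.map (fun kw => (PySem.Str.len (PySem.Str.lower kw) : Int))))

-- subs_by_pid = [(pid, {…substrings…}) for pid, txt in text_by_prokka.items() if txt]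
def pvSubsByPid (text_by_prokka : List (String × String)) (lens : PySem.Set Int) : List (String × PySem.Set String) :=
  (text_by_prokka.filter (fun p => p.2 ≠ "")).map (fun p => (p.1, pvSubs p.2 lens))

-- {cat: {pid for pid, subs in subs_by_pid if any(kw.lower() in subs for kw in kwlist)} for cat, kwlist in keywords.items()}
def find_keyword_matches_alt (text_by_prokka : List (String × String)) (keywords : List (String × List String)) : List (String × List String) :=
  keywords.map (fun e => (e.1, PySem.Set.ofList
    (((pvSubsByPid text_by_prokka (pvLens keywords)).filter
        (fun q => e.2.any (fun kw => PySem.Set.contains q.2 (PySem.Str.lower kw)))).map Prod.fst)))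

-- ===== PRECONDITION & SPEC =====
-- Pre_ encodes the key-uniqueness Python dicts guarantee: both arguments stand for dicts,
-- so their association lists must have pairwise-distinct keys (duplicate keys are not
-- representable as a Python input to A at all).
def Pre_find_keyword_matches (text_by_prokka : List (String × String)) (keywords : List (String × List String)) : Prop :=
  (text_by_prokka.map Prod.fst).Nodup ∧ (keywords.map Prod.fst).Nodup
instance (text_by_prokka : List (String × String)) (keywords : List (String × List String)) : Decidable (Pre_find_keyword_matches text_by_prokka keywords) := by unfold Pre_find_keyword_matches; infer_instance

def pvWitness_find_keyword_matches : (List (String × String)) × (List (String × List String)) :=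
  ([("g1", "abc def"), ("g2", "xyz")], [("cat1", ["ABC"]), ("cat2", ["q", "xy"])])

def Spec_find_keyword_matches (text_by_prokka : List (String × String)) (keywords : List (String × List String)) (out : List (String × List String)) : Prop := out = find_keyword_matches_alt text_by_prokka keywords
instance (text_by_prokka : List (String × String)) (keywords : List (String × List String)) (out : List (String × List String)) : Decidable (Spec_find_keyword_matches text_by_prokka keywords out) := by unfold Spec_find_keyword_matches; infer_instance

-- ===== CLAIM (what is proved, stated in full; the proofs are below) =====
def Claim_equal_find_keyword_matches : Prop := ∀ (text_by_prokka : List (String × String)) (keywords : List (String × List String)), Dom_find_keyword_matches text_by_prokka keywords → Pre_find_keyword_matches text_by_prokka keywords → Spec_find_keyword_matches text_by_prokka keywords (find_keyword_matches text_by_prokka keywords)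

-- ===== LEMMAS AND PROOFS =====

-- membership-aware congruence for List.any
theorem pvAny_congr {α : Type} (l : List α) (p q : α → Bool)
    (h : ∀ x ∈ l, p x = q x) : l.any p = l.any q := by
  induction l with
  | nil => rfl
  | cons x rest ih =>
      simp only [List.any_cons, h x (by simp), ih (fun y hy => h y (by simp [hy]))]

-- does any keyword of the list match the text?
def pvMatch (kwlist : List String) (txt : String) : Bool :=
  kwlist.any (fun kw => PySem.Str.isIn (PySem.Str.lower kw) txt)

theorem pvKwLoop_eq (m : List (String × List String)) (kwlist : List String)
    (cat pid txt : String) :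
    pvKwLoop m kwlist cat pid txt = if pvMatch kwlist txt then pvAddMatch m cat pid else m := by
  induction kwlist with
  | nil => simp [pvKwLoop, pvMatch]
  | cons kw rest ih =>
      have hcons : pvMatch (kw :: rest) txt
          = (PySem.Str.isIn (PySem.Str.lower kw) txt || pvMatch rest txt) := rfl
      have hloop : pvKwLoop m (kw :: rest) cat pid txt
          = if PySem.Str.isIn (PySem.Str.lower kw) txt = true then pvAddMatch m cat pid
            else pvKwLoop m rest cat pid txt := rfl
      rw [hloop, hcons]
      cases h : PySem.Str.isIn (PySem.Str.lower kw) txt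
      · simpa using ih
      · simp

theorem pvAddMatch_append_not_mem (l m : List (String × List String)) (cat pid : String)
    (h : cat ∉ l.map Prod.fst) :
    pvAddMatch (l ++ m) cat pid = l ++ pvAddMatch m cat pid := by
  induction l with
  | nil => rfl
  | cons a rest ih =>
      simp only [List.map_cons, List.mem_cons] at h
      push Not at h
      simp [pvAddMatch, Ne.symm h.1, ih h.2]

-- the inner fold over the categories updates the map-shaped state pointwise
theorem pvInner_fold (todo : List (String × List String)) (pre : List (String × List String))
    (g : String × List String → List String) (pid txt : String)
    (hdisj : ∀ e ∈ todo, e.1 ∉ pre.map Prod.fst)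
    (hnd : (todo.map Prod.fst).Nodup) :
    todo.foldl (fun m' e => pvKwLoop m' e.2 e.1 pid txt)
        (pre ++ todo.map (fun e => (e.1, g e)))
      = pre ++ todo.map (fun e => (e.1, if pvMatch e.2 txt then PySem.Set.add (g e) pid else g e)) := by
  induction todo generalizing pre g with
  | nil => rfl
  | cons e rest ih =>
      simp only [List.map_cons, List.nodup_cons, List.mem_map] at hnd
      have he : e.1 ∉ pre.map Prod.fst := hdisj e (by simp)
      have hstep :
          pvKwLoop (pre ++ (e.1, g e) :: rest.map (fun e => (e.1, g e))) e.2 e.1 pid txt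
            = (pre ++ [(e.1, if pvMatch e.2 txt then PySem.Set.add (g e) pid else g e)])
              ++ rest.map (fun e => (e.1, g e)) := by
        rw [pvKwLoop_eq]
        by_cases hm : pvMatch e.2 txt = true
        · rw [hm, if_pos rfl, pvAddMatch_append_not_mem _ _ _ _ he]
          simp [pvAddMatch]
        · simp only [Bool.not_eq_true] at hm
          simp [hm]
      simp only [List.foldl_cons, List.map_cons, hstep]
      rw [ih (pre ++ [(e.1, if pvMatch e.2 txt then PySem.Set.add (g e) pid else g e)]) g
          (by intro x hx
              simp only [List.map_append, List.mem_append, List.map_cons, List.map_nil,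
                List.mem_singleton]
              push Not
              refine ⟨hdisj x (by simp [hx]), ?_⟩
              intro hc
              exact hnd.1 ⟨x, hx, hc⟩)
          hnd.2]
      simp

theorem set_add_not_mem (s : List String) (x : String) (h : x ∉ s) :
    PySem.Set.add s x = s ++ [x] := by
  simp [PySem.Set.add, PySem.Set.contains_eq_listContains]
  intro hc
  exact absurd hc h

-- the outer fold over the texts builds, per category, the ids of the matching texts
theorem pvOuter_fold (ts : List (String × String)) (kws : List (String × List String))
    (g : String × List String → List String)
    (hknd : (kws.map Prod.fst).Nodup)
    (htnd : (ts.map Prod.fst).Nodup)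
    (hg : ∀ e ∈ kws, ∀ p ∈ ts, p.1 ∉ g e) :
    ts.foldl
        (fun m p =>
          if p.2 = "" then m
          else kws.foldl (fun m' e => pvKwLoop m' e.2 e.1 p.1 p.2) m)
        (kws.map (fun e => (e.1, g e)))
      = kws.map (fun e =>
          (e.1, g e ++ (ts.filter (fun p => (!(p.2 == "")) && pvMatch e.2 p.2)).map Prod.fst)) := by
  induction ts generalizing g with
  | nil => simp
  | cons p rest ih =>
      simp only [List.map_cons, List.nodup_cons, List.mem_map] at htnd
      by_cases hp : p.2 = ""
      · simp only [List.foldl_cons, if_pos hp]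
        rw [ih g htnd.2 (fun e he q hq => hg e he q (by simp [hq]))]
        simp [hp]
      · simp only [List.foldl_cons, if_neg hp]
        have hin := pvInner_fold kws [] g p.1 p.2 (by simp) hknd
        simp only [List.nil_append] at hin
        rw [hin]
        set g' : String × List String → List String :=
          fun e => if pvMatch e.2 p.2 then PySem.Set.add (g e) p.1 else g e with hg'
        rw [ih g' htnd.2
            (by intro e he q hq
                simp only [hg']
                have h1 : q.1 ∉ g e := hg e he q (by simp [hq])
                have h2 : q.1 ≠ p.1 := by
                  intro hc
                  exact htnd.1 ⟨q, hq, hc⟩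
                by_cases hm : pvMatch e.2 p.2 = true
                · rw [if_pos hm, set_add_not_mem _ _ (hg e he p (by simp))]
                  simp [h1, h2]
                · simp only [Bool.not_eq_true] at hm
                  simp [hm, h1])]
        apply List.map_congr_left
        intro e he
        simp only [hg', List.filter_cons]
        by_cases hm : pvMatch e.2 p.2 = true
        · rw [set_add_not_mem _ _ (hg e he p (by simp))]
          simp [hp, hm]
        · simp only [Bool.not_eq_true] at hm
          simp [hm]

-- every [a:b] slice of a list is one of its infixes
theorem pvSlice_infix (xs : List Char) (a b : Int) :
    PySem.List.slice xs (some a) (some b) <:+: xs := by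
  simp only [PySem.List.slice]
  exact ((List.take_prefix _ _).isInfix).trans ((List.drop_suffix _ _).isInfix)

-- the substring hash set contains k iff k occurs in txt (given k's length is listed)
theorem pvContains_subs (txt k : String) (lens : List Int)
    (hk : (k.toList.length : Int) ∈ lens) :
    PySem.Set.contains (pvSubs txt lens) k = PySem.Str.isIn k txt := by
  rw [Bool.eq_iff_iff]
  simp only [pvSubs, PySem.Set.contains_eq_listContains, List.contains_iff_exists_mem_beq,
    beq_iff_eq]
  constructor
  · rintro ⟨x, hx, rfl⟩
    rw [PySem.Str.isIn_iff_infix]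
    rcases PySem.Set.mem_ofList _ _ |>.mp hx with hx'
    rcases List.mem_flatMap.mp hx' with ⟨L, _, hxL⟩
    rcases List.mem_map.mp hxL with ⟨i, _, rfl⟩
    rw [PySem.Str.toList_slice]
    exact pvSlice_infix _ _ _
  · intro hin
    rcases (PySem.Str.isIn_iff_infix _ _).mp hin with ⟨s, t, hst⟩
    refine ⟨PySem.Str.slice txt (some (s.length : Int))
      (some ((s.length : Int) + (k.toList.length : Int))), ?_, ?_⟩
    · apply (PySem.Set.mem_ofList _ _).mpr
      apply List.mem_flatMap.mpr
      refine ⟨(k.toList.length : Int), hk, ?_⟩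
      apply List.mem_map.mpr
      refine ⟨(s.length : Int), ?_, rfl⟩
      apply (PySem.List.mem_pyRange_one).mpr
      have hlen : s.length + k.toList.length ≤ txt.toList.length := by
        rw [← hst]; simp only [List.length_append]; omega
      constructor
      · positivity
      · simp only [PySem.Str.len_eq]
        omega
    · apply String.toList_inj.mp
      rw [PySem.Str.toList_slice, PySem.Chars.slice_eq_listSlice,
        PySem.List.slice_natCast_add, ← hst]
      rw [List.append_assoc, List.drop_left, List.take_left]

-- set(xs) on a duplicate-free list is xs itself
theorem pvOfList_nodup (xs acc : List String) (h : (acc ++ xs).Nodup) :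
    xs.foldl PySem.Set.add acc = acc ++ xs := by
  induction xs generalizing acc with
  | nil => simp
  | cons x rest ih =>
      have hx : x ∉ acc := by
        intro hc
        exact (List.disjoint_of_nodup_append h) hc (by simp)
      rw [List.foldl_cons, set_add_not_mem acc x hx, ih (acc ++ [x]) (by simpa using h)]
      simp

theorem pvSet_ofList_nodup (xs : List String) (h : xs.Nodup) :
    PySem.Set.ofList xs = xs := by
  have := pvOfList_nodup xs [] (by simpa using h)
  simpa [PySem.Set.ofList_eq_foldl] using this

theorem find_keyword_matches_spec : Claim_equal_find_keyword_matches := by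
  intro tbp kws _ hpre
  unfold Spec_find_keyword_matches find_keyword_matches find_keyword_matches_alt pvSubsByPid
  rw [pvOuter_fold tbp kws (fun _ => []) hpre.2 hpre.1 (by simp)]
  apply List.map_congr_left
  intro e he
  simp only [List.nil_append, Prod.mk.injEq, true_and]
  rw [List.filter_map, List.map_map]
  have hany : ∀ p : String × String,
      (e.2.any (fun kw => PySem.Set.contains (pvSubs p.2 (pvLens kws)) (PySem.Str.lower kw)))
      = pvMatch e.2 p.2 := by
    intro p
    unfold pvMatch
    apply pvAny_congr
    intro kw hkw
    apply pvContains_subs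
    apply (PySem.Set.mem_ofList _ _).mpr
    apply List.mem_flatMap.mpr
    refine ⟨e, he, List.mem_map.mpr ⟨kw, hkw, by simp⟩⟩
  have hfilters :
      ((tbp.filter (fun p => decide (p.2 ≠ ""))).filter
          ((fun q : String × PySem.Set String =>
              e.2.any (fun kw => PySem.Set.contains q.2 (PySem.Str.lower kw))) ∘
            (fun p : String × String => (p.1, pvSubs p.2 (pvLens kws)))))
        = tbp.filter (fun p => (!(p.2 == "")) && pvMatch e.2 p.2) := by
    simp only [Function.comp_def]
    rw [List.filter_filter]
    apply List.filter_congr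
    intro p _
    rw [hany p]
    by_cases h : p.2 = "" <;> simp [h, Bool.and_comm]
  rw [hfilters]
  exact (pvSet_ofList_nodup _
    (hpre.1.sublist (List.filter_sublist.map Prod.fst))).symm
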